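-- pv_equiv track=rewrite | github.com/t0r1n88/Lachesis | mental_state/gilemhanova_ickbsh.py | calc_value_spu
-- ===== SOURCE A (Python) =====
-- def calc_value_spu(row):
--     """
--     Функция для подсчета значения
--     :return: число
--     """
--     lst_pr = [6,7,12,22,31,32,21]
--     lst_neg = [21]
--     value_forward = 0  # результат
--     for idx, value in enumerate(row,1):
--         if idx in lst_pr:
--             if idx not in lst_neg:
--                 value_forward += value
--             else:
--                 if value == 1:
--                     value_forward += 4
--                 elif value == 2:
--                     value_forward += 3
--                 elif value == 3:
--                     value_forward += 2
--                 else: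
--                     value_forward += 1
--
--
--     return value_forward
-- ===== SOURCE B (Python) =====
-- def calc_value_spu(row):
--     """
--     Функция для подсчета значения
--     :return: число
--     """
--     r = list(row)
--     n = len(r)
--     total = 0
--     for idx in (6, 7, 12, 22, 31, 32):
--         if idx <= n:
--             total += r[idx - 1]
--     if 21 <= n:
--         v = r[20]
--         if v == 1:
--             total += 4
--         elif v == 2:
--             total += 3
--         elif v == 3:
--             total += 2
--         else:
--             total += 1
--     return total
-- ===== Notes on version B (the rewrite author's own statement) =====
-- stated objective: simpler
-- what changed: Instead of scanning every element of the row with per-index membership tests, B accesses only the seven relevant positions directly: it sums r[idx-1] for the six additive indices when present and handles position 21 with its own if/elif chain.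
import Mathlib
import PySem

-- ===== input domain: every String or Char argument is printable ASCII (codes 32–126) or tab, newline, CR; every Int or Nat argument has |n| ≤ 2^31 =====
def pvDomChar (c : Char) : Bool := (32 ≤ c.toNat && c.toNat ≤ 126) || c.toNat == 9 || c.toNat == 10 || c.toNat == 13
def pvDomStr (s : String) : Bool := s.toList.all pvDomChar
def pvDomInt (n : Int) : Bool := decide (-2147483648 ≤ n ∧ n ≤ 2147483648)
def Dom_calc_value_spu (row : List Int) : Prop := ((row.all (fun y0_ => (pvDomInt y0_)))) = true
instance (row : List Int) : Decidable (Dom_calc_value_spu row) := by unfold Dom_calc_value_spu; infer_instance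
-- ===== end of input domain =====

-- B replaces A's scan of every row element with direct access to the six summed
-- positions plus the special position 21 (objective: simpler).


-- ===== PORT A =====
-- the for-loop over enumerate(row, 1) with accumulator value_forward
def goA : List Int → Int → Int → Int
  | [], _, acc => acc
  | v :: rest, idx, acc =>
      goA rest (idx + 1)
        (if idx ∈ ([6, 7, 12, 22, 31, 32, 21] : List Int) then
          (if idx ∉ ([21] : List Int) then acc + v
           else if v = 1 then acc + 4
           else if v = 2 then acc + 3
           else if v = 3 then acc + 2
           else acc + 1)
         else acc)

def calc_value_spu (row : List Int) : Int := goA row 1 0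

-- ===== PORT B =====
-- r[idx-1] is ported as r.getD (idx-1) 0: the guard idx ≤ n makes the access
-- in-range, so getD is exact there (Python never raises on these accesses).
def calc_value_spu_alt (row : List Int) : Int :=
  let r := row
  let n := r.length
  let total := ([6, 7, 12, 22, 31, 32] : List Nat).foldl
    (fun total idx => if idx ≤ n then total + r.getD (idx - 1) 0 else total) 0
  if 21 ≤ n then
    let v := r.getD 20 0
    if v = 1 then total + 4
    else if v = 2 then total + 3
    else if v = 3 then total + 2
    else total + 1
  else total

-- ===== PRECONDITION & SPEC =====
def Spec_calc_value_spu (row : List Int) (out : Int) : Prop := out = calc_value_spu_alt row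
instance (row : List Int) (out : Int) : Decidable (Spec_calc_value_spu row out) := by unfold Spec_calc_value_spu; infer_instance

-- ===== CLAIM (what is proved, stated in full; the proofs are below) =====
def Claim_equal_calc_value_spu : Prop := ∀ (row : List Int), Dom_calc_value_spu row → Spec_calc_value_spu row (calc_value_spu row)

-- ===== LEMMAS AND PROOFS =====

-- the index-21 bonus
def pvBonus (v : Int) : Int :=
  if v = 1 then 4 else if v = 2 then 3 else if v = 3 then 2 else 1

-- extraction of f applied to the single element at 1-based position t
def pvPick (f : Int → Int) (t : Int) : List Int → Int → Int
  | [], _ => 0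
  | v :: rest, k => (if k = t then f v else 0) + pvPick f t rest (k + 1)

theorem pvPick_closed (f : Int → Int) (t : Int) (row : List Int) : ∀ (k : Int),
    pvPick f t row k =
      if k ≤ t ∧ t < k + row.length then f (row.getD (t - k).toNat 0) else 0 := by
  induction row with
  | nil => intro k; simp [pvPick]
  | cons v rest ih =>
      intro k
      simp only [pvPick, ih, List.length_cons]
      by_cases h : k = t
      · subst h
        have c3 : k ≤ k ∧ k < k + ((rest.length : Int) + 1) := ⟨le_rfl, by omega⟩
        simp [c3]
      · rw [if_neg h]
        by_cases h2 : k + 1 ≤ t ∧ t < k + 1 + (rest.length : Int)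
        · have ht : (t - k).toNat = (t - (k + 1)).toNat + 1 := by omega
          have c3' : k ≤ t ∧ t < k + ((rest.length : Int) + 1) := ⟨by omega, by omega⟩
          simp [h2, c3', ht]
        · have c3 : ¬(k ≤ t ∧ t < k + ((rest.length : Int) + 1)) := by omega
          simp [c3]
          intro h3 h4
          exfalso
          omega

theorem goA_as_picks (row : List Int) : ∀ (k acc : Int),
    goA row k acc = acc + pvPick id 6 row k + pvPick id 7 row k + pvPick id 12 row k
      + pvPick pvBonus 21 row k + pvPick id 22 row k + pvPick id 31 row k + pvPick id 32 row k := by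
  induction row with
  | nil => intro k acc; simp [goA, pvPick]
  | cons v rest ih =>
      intro k acc
      simp only [goA, pvPick, ih]
      have hstep : (if k ∈ ([6, 7, 12, 22, 31, 32, 21] : List Int) then
          (if k ∉ ([21] : List Int) then acc + v
           else if v = 1 then acc + 4
           else if v = 2 then acc + 3
           else if v = 3 then acc + 2
           else acc + 1)
         else acc) =
          acc + (if k = 6 then v else 0) + (if k = 7 then v else 0)
            + (if k = 12 then v else 0) + (if k = 21 then pvBonus v else 0)
            + (if k = 22 then v else 0) + (if k = 31 then v else 0)
            + (if k = 32 then v else 0) := by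
        by_cases h : k ∈ ([6, 7, 12, 22, 31, 32, 21] : List Int)
        · rw [if_pos h]
          simp only [List.mem_cons, List.not_mem_nil, or_false] at h
          rcases h with h|h|h|h|h|h|h <;> subst h <;> simp [pvBonus] <;> split_ifs <;> omega
        · rw [if_neg h]
          simp only [List.mem_cons, List.not_mem_nil, or_false] at h
          push_neg at h
          simp [h.1, h.2.1, h.2.2.1, h.2.2.2.1, h.2.2.2.2.1, h.2.2.2.2.2.1, h.2.2.2.2.2.2]
      rw [hstep]
      simp only [id]
      ring

-- fold the inline bonus if-chain of port B into pvBonus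
theorem bonus_chain (x v : Int) :
    (if v = 1 then x + 4 else if v = 2 then x + 3 else if v = 3 then x + 2 else x + 1)
      = x + pvBonus v := by
  simp only [pvBonus]; split_ifs <;> ring

theorem term_eq (f : Int → Int) (t : Int) (m : Nat) (hm : t = (m : Int) + 1) (row : List Int) :
    (if 1 ≤ t ∧ t < 1 + (row.length : Int) then f (row.getD (t - 1).toNat 0) else 0)
      = (if m + 1 ≤ row.length then f (row.getD m 0) else 0) := by
  by_cases h : m + 1 ≤ row.length
  · rw [if_pos ⟨by omega, by omega⟩, if_pos h]
    have hx : (t - 1).toNat = m := by omega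
    rw [hx]
  · rw [if_neg (by omega), if_neg h]

theorem A_closed (row : List Int) : calc_value_spu row =
    (if 6 ≤ row.length then row.getD 5 0 else 0)
      + (if 7 ≤ row.length then row.getD 6 0 else 0)
      + (if 12 ≤ row.length then row.getD 11 0 else 0)
      + (if 21 ≤ row.length then pvBonus (row.getD 20 0) else 0)
      + (if 22 ≤ row.length then row.getD 21 0 else 0)
      + (if 31 ≤ row.length then row.getD 30 0 else 0)
      + (if 32 ≤ row.length then row.getD 31 0 else 0) := by
  unfold calc_value_spu
  rw [goA_as_picks]
  simp only [pvPick_closed]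
  rw [term_eq id 6 5 (by norm_num) row, term_eq id 7 6 (by norm_num) row,
    term_eq id 12 11 (by norm_num) row, term_eq pvBonus 21 20 (by norm_num) row,
    term_eq id 22 21 (by norm_num) row, term_eq id 31 30 (by norm_num) row,
    term_eq id 32 31 (by norm_num) row]
  norm_num

-- ===== VERDICT (by name: the statement is the Claim_ definition above) =====
theorem calc_value_spu_spec : Claim_equal_calc_value_spu := by
  intro row _
  unfold Spec_calc_value_spu calc_value_spu_alt
  rw [A_closed]
  simp only [List.foldl, bonus_chain]
  norm_num
  split_ifs <;> omega
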